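-- pv_equiv track=rewrite | github.com/gbaghdasaryan94/Kapan | Garnik/Python 3/Recursion/5.py | if_mirror
-- ===== SOURCE A (Python) =====
-- mirror = 'AHIMOTUVWXY'.lower()
--
-- def if_mirror(s):
--     if s[0] in mirror:
--         if len(s) <= 2 and s[0] == s[-1]:
--             return True
--         else:
--             if s[0] != s[-1]:
--                 return False
--             else:
--                 return if_mirror(s[1:-1])
--     else:
--         return False
-- ===== SOURCE B (Python) =====
-- mirror = 'AHIMOTUVWXY'.lower()
--
-- def if_mirror(s):
--     half = (len(s) + 1) // 2
--     return all(a in mirror and a == b for a, b in zip(s[:half], reversed(s)))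
-- ===== Notes on version B (the rewrite author's own statement) =====
-- stated objective: faster
-- what changed: Replaced the recursive peel-off with repeated O(n) slicing by a single linear pass that zips the first half of the string with its reverse and checks mirror membership plus equality.
import Mathlib
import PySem

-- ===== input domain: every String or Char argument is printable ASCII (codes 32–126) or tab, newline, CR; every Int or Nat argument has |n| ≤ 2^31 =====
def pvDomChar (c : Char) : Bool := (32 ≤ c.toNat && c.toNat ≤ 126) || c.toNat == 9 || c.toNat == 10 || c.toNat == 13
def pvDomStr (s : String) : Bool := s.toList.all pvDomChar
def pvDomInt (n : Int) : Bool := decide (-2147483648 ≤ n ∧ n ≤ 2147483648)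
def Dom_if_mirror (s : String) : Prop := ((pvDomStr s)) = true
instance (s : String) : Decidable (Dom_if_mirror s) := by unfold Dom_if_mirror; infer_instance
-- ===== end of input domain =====

-- B replaces A's recursive peel-off with repeated slicing by one linear zip pass over half
-- the string; return values agree on all non-empty strings (A raises IndexError on "").

-- ===== PORT A =====
-- mirror = 'AHIMOTUVWXY'.lower()
def pvMirror : List Char := PySem.Chars.lower ("AHIMOTUVWXY".toList)

-- literal transliteration of A's recursion on the code-point list; 's[0] in mirror' is
-- single-character substring membership, which is exactly list membership of that character.
def ifMirrorA (l : List Char) : Bool :=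
  match PySem.List.pyGet? l 0, PySem.List.pyGet? l (-1) with
  | some c0, some cl =>
    if pvMirror.contains c0 then
      if l.length ≤ 2 && c0 == cl then true
      else if c0 != cl then false
      else ifMirrorA (PySem.List.slice l (some 1) (some (-1)))
    else false
  | _, _ => false       -- IndexError branch (l = []); excluded by Pre_
termination_by l.length
decreasing_by
  have hl : l ≠ [] := by
    rintro rfl
    simp_all
  have := PySem.List.length_slice (xs := l) (a := (1 : Int)) (b := (-1 : Int))
  have h1 : PySem.List.clampIdx l.length (-1) = l.length - 1 := by simp
  have h2 : PySem.List.clampIdx l.length 1 = min 1 l.length := by simp [PySem.List.clampIdx]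
  have hn : 1 ≤ l.length := Nat.one_le_iff_ne_zero.mpr (by simpa using hl)
  omega

def if_mirror (s : String) : Bool := ifMirrorA s.toList

-- ===== PORT B =====
-- half = (len(s) + 1) // 2 ; all(a in mirror and a == b for a, b in zip(s[:half], reversed(s)))
def ifMirrorB (l : List Char) : Bool :=
  let half := (l.length + 1) / 2
  ((l.take half).zip l.reverse).all (fun p => pvMirror.contains p.1 && p.1 == p.2)

def if_mirror_alt (s : String) : Bool := ifMirrorB s.toList

-- ===== PRECONDITION & SPEC =====
-- A evaluates s[0] unconditionally, so it raises IndexError exactly on the empty string.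
def Pre_if_mirror (s : String) : Prop := s ≠ ""
instance (s : String) : Decidable (Pre_if_mirror s) := by unfold Pre_if_mirror; infer_instance
def pvWitness_if_mirror : String := "aha"

def Spec_if_mirror (s : String) (out : Bool) : Prop := out = if_mirror_alt s
instance (s : String) (out : Bool) : Decidable (Spec_if_mirror s out) := by unfold Spec_if_mirror; infer_instance

-- ===== CLAIM (what is proved, stated in full; the proofs are below) =====
def Claim_equal_if_mirror : Prop := ∀ (s : String), Dom_if_mirror s → Pre_if_mirror s → Spec_if_mirror s (if_mirror s)

-- ===== LEMMAS AND PROOFS =====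

-- zip ignores anything appended past the length of the shorter left list
theorem zip_append_right {α β : Type} (l1 : List α) (l2 l3 : List β)
    (h : l1.length ≤ l2.length) : l1.zip (l2 ++ l3) = l1.zip l2 := by
  induction l1 generalizing l2 with
  | nil => simp
  | cons a t ih =>
    cases l2 with
    | nil => simp at h
    | cons b t2 =>
      simp only [List.cons_append, List.zip_cons_cons]
      exact congrArg _ (ih t2 (by simpa using h))

theorem ifMirrorB_single (c : Char) : ifMirrorB [c] = pvMirror.contains c := by
  simp [ifMirrorB]

-- one "level" of B: peeling the outer pair off the zip
theorem ifMirrorB_step (c d : Char) (m : List Char) :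
    ifMirrorB (c :: m ++ [d]) = ((pvMirror.contains c && (c == d)) && ifMirrorB m) := by
  have hle : (m.length + 1) / 2 ≤ m.length := by omega
  have hhalf : (m.length + (0 + 1) + 1 + 1) / 2 = (m.length + 1) / 2 + 1 := by omega
  simp only [ifMirrorB, List.cons_append, List.length_cons, List.length_append,
    List.length_nil, List.reverse_cons, List.reverse_append, List.reverse_nil, List.nil_append]
  rw [hhalf]
  simp only [List.take_succ_cons, List.zip_cons_cons, List.all_cons]
  rw [List.take_append_of_le_length hle, zip_append_right _ _ _ (by simp [hle])]

theorem ifMirrorA_single (c : Char) : ifMirrorA [c] = pvMirror.contains c := by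
  rw [ifMirrorA]
  have h1 : PySem.List.pyGet? [c] (0:Int) = some c := by
    simp [PySem.List.pyGet?, PySem.List.pyIdx?]
  have h2 : PySem.List.pyGet? [c] (-1:Int) = some c := by
    simp [PySem.List.pyGet?, PySem.List.pyIdx?]
  rw [h1, h2]
  simp

-- one "level" of A: the indexing, slicing and branch tests made explicit
theorem ifMirrorA_step (c d : Char) (m : List Char) :
    ifMirrorA (c :: m ++ [d]) =
      (if pvMirror.contains c then
        if (c :: m ++ [d]).length ≤ 2 && c == d then true
        else if c != d then false
        else ifMirrorA m
       else false) := by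
  rw [ifMirrorA]
  have hp : (0:Int) ≤ (m.length:Int) + 1 := by positivity
  have h1 : PySem.List.pyGet? (c :: m ++ [d]) (0:Int) = some c := by
    simp [PySem.List.pyGet?, PySem.List.pyIdx?, hp]
  have h2 : PySem.List.pyGet? (c :: m ++ [d]) (-1:Int) = some d := by
    simp [PySem.List.pyGet?, PySem.List.pyIdx?]
  have h3 : PySem.List.slice (c :: m ++ [d]) (some 1) (some (-1)) = m := by
    simp [PySem.List.slice]
  rw [h1, h2, h3]

theorem A_eq_B : ∀ (n : Nat) (l : List Char), l.length ≤ n → l ≠ [] → ifMirrorA l = ifMirrorB l := by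
  intro n
  induction n with
  | zero =>
    intro l hlen hne
    cases l with
    | nil => exact absurd rfl hne
    | cons c t => simp at hlen
  | succ n ih =>
    intro l hlen hne
    obtain ⟨c, t, rfl⟩ := List.exists_cons_of_ne_nil hne
    rcases List.eq_nil_or_concat t with rfl | ⟨m, d, rfl⟩
    · rw [ifMirrorA_single, ifMirrorB_single]
    · rw [List.concat_eq_append] at *
      rw [← List.cons_append, ifMirrorA_step, ifMirrorB_step]
      by_cases hc : c ∈ pvMirror
      · by_cases hcd : c = d
        · subst hcd
          rcases List.eq_nil_or_concat m with rfl | ⟨m', d', rfl⟩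
          · simp [ifMirrorB]
          · rw [List.concat_eq_append] at *
            have hm : (m' ++ [d']) ≠ [] := by simp
            have hrec := ih (m' ++ [d']) (by simp_all; omega) hm
            simp [hc, hrec]
        · simp [hc, hcd]
      · simp [hc]

-- ===== VERDICT (by name: the statement is the Claim_ definition above) =====
theorem if_mirror_spec : Claim_equal_if_mirror := by
  intro s _ hpre
  unfold Spec_if_mirror if_mirror if_mirror_alt
  apply A_eq_B s.toList.length _ le_rfl
  intro h
  exact hpre (by simpa [String.toList_eq_nil_iff] using h)
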